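-- pv_equiv track=rewrite | github.com/PabloRMira/sql_formatter | sql_formatter/utils.py | identify_newline_chars
-- ===== SOURCE A (Python) =====
-- def identify_newline_chars(s):
--     "Identify newline characters in `s` but not in the comments"
--     # container for positions
--     positions = []
--     # counter for comments
--     k = 0  # 0 = no comment range
--     # loop over character positions
--     for i in range(len(s)):
--         if s[i:i+1] == "\n" and k == 0:  # catch newline position
--             positions.append(i)
--         elif s[i:i+2] == "/*": # if there is an opening comment
--             k += 1
--         elif s[i:i+2] == "*/":  # if there is a closing comment
--             k -= 1
--     return positions
-- ===== SOURCE B (Python) =====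
-- def identify_newline_chars(s):
--     "Identify newline characters in `s` but not in the comments"
--     # pass 1: depth of comment nesting active just before each position
--     depths = []
--     k = 0
--     for i in range(len(s)):
--         depths.append(k)
--         if s[i:i+2] == "/*":
--             k += 1
--         elif s[i:i+2] == "*/":
--             k -= 1
--     # pass 2: keep newline positions at depth 0
--     return [i for i, (c, d) in enumerate(zip(s, depths)) if c == "\n" and d == 0]
-- ===== Notes on version B (the rewrite author's own statement) =====
-- stated objective: alternative
-- what changed: Replaces A's single interleaved loop (positions and comment counter updated together) by two separately-shaped passes: first build a table of the comment-nesting depth active before each position, then filter newline positions whose depth is 0 via enumerate+zip.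
import Mathlib
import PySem

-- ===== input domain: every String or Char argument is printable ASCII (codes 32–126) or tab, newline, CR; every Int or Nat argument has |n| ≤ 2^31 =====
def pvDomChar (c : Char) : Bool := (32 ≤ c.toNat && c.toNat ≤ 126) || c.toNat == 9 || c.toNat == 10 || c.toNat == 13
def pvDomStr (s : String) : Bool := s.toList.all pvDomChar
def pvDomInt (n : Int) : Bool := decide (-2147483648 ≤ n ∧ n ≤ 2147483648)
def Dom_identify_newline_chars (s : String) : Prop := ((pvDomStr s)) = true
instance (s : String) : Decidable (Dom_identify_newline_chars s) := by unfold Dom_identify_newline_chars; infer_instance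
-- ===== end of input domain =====

-- B replaces A's single interleaved loop by two passes (a depth table, then a filter); alternative decomposition, same cost.

-- ===== PORT A =====
-- A's loop over i in range(len s) with state (positions, k); s[i:i+1]=="\n" is the
-- current char, s[i:i+2]=="/*" is current char '/' with next char '*' (exact: both
-- windows exist iff enough chars remain, which rest.head? captures).
def identifyNewlineGoA : List Char → Int → Int → List Int
  | [], _, _ => []
  | c :: rest, i, k =>
    if c = '\n' ∧ k = 0 then i :: identifyNewlineGoA rest (i + 1) k
    else if c = '/' ∧ rest.head? = some '*' then identifyNewlineGoA rest (i + 1) (k + 1)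
    else if c = '*' ∧ rest.head? = some '/' then identifyNewlineGoA rest (i + 1) (k - 1)
    else identifyNewlineGoA rest (i + 1) k

def identify_newline_chars (s : String) : List Int :=
  identifyNewlineGoA s.toList 0 0

-- ===== PORT B =====
-- pass 1: comment-nesting depth active just before each position
def identifyNewlineDepths : List Char → Int → List Int
  | [], _ => []
  | c :: rest, k =>
    k :: identifyNewlineDepths rest
      (if c = '/' ∧ rest.head? = some '*' then k + 1
       else if c = '*' ∧ rest.head? = some '/' then k - 1
       else k)

-- pass 2: keep newline positions at depth 0
def identify_newline_chars_alt (s : String) : List Int :=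
  let cs := s.toList
  let depths := identifyNewlineDepths cs 0
  ((cs.zip depths).zipIdx).filterMap
    (fun p => if p.1.1 = '\n' ∧ p.1.2 = 0 then some ((p.2 : Int)) else none)

-- ===== PRECONDITION & SPEC =====
def Spec_identify_newline_chars (s : String) (out : List Int) : Prop := out = identify_newline_chars_alt s
instance (s : String) (out : List Int) : Decidable (Spec_identify_newline_chars s out) := by unfold Spec_identify_newline_chars; infer_instance

-- ===== CLAIM (what is proved, stated in full; the proofs are below) =====
def Claim_equal_identify_newline_chars : Prop := ∀ (s : String), Dom_identify_newline_chars s → Spec_identify_newline_chars s (identify_newline_chars s)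

-- ===== LEMMAS AND PROOFS =====
theorem identifyNewline_go_eq (cs : List Char) : ∀ (k : Int) (n : Nat),
    identifyNewlineGoA cs (n : Int) k =
      (((cs.zip (identifyNewlineDepths cs k)).zipIdx n).filterMap
        (fun p => if p.1.1 = '\n' ∧ p.1.2 = 0 then some ((p.2 : Int)) else none)) := by
  induction cs with
  | nil => intro k n; simp [identifyNewlineGoA, identifyNewlineDepths]
  | cons c rest ih =>
    intro k n
    simp only [identifyNewlineGoA, identifyNewlineDepths, List.zip_cons_cons,
      List.zipIdx_cons, List.filterMap_cons]
    by_cases h1 : c = '\n' ∧ k = 0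
    · -- newline at depth 0: appended; the comment-window tests cannot fire on '\n'
      have hne : ¬ (c = '/' ∧ rest.head? = some '*') := by
        rintro ⟨h, _⟩; simp [h1.1] at h
      have hne2 : ¬ (c = '*' ∧ rest.head? = some '/') := by
        rintro ⟨h, _⟩; simp [h1.1] at h
      simp only [if_pos h1, if_neg hne, if_neg hne2]
      have := ih k (n + 1)
      push_cast at this ⊢
      rw [this]
    · by_cases h2 : c = '/' ∧ rest.head? = some '*'
      · have := ih (k + 1) (n + 1)
        push_cast at this ⊢
        simp [h2.1, h2.2, this]
      · by_cases h3 : c = '*' ∧ rest.head? = some '/'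
        · have := ih (k - 1) (n + 1)
          push_cast at this ⊢
          simp [h3.1, h3.2, this]
        · have := ih k (n + 1)
          push_cast at this ⊢
          simp [if_neg h1, if_neg h2, if_neg h3, this]

-- ===== VERDICT (by name: the statement is the Claim_ definition above) =====
theorem identify_newline_chars_spec : Claim_equal_identify_newline_chars := by
  intro s _
  unfold Spec_identify_newline_chars identify_newline_chars identify_newline_chars_alt
  simpa using identifyNewline_go_eq s.toList 0 0
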